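-- pv_equiv track=rewrite | github.com/pythoandtrojan/PolyTools | OSINT/ddd-ddi.py | _identificar_regiao
-- ===== SOURCE A (Python) =====
-- def _identificar_regiao(ddd: str) -> str:
--     """Identifica a região do DDD"""
--     regioes = {
--         '11-19': 'Sudeste (SP)',
--         '21-24': 'Sudeste (RJ/ES)',
--         '27-28': 'Sudeste (ES)',
--         '31-38': 'Sudeste (MG)',
--         '41-46': 'Sul (PR)',
--         '47-49': 'Sul (SC)',
--         '51-55': 'Sul (RS)',
--         '61': 'Centro-Oeste (DF)',
--         '62-64': 'Centro-Oeste (GO)',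
--         '65-66': 'Centro-Oeste (MT)',
--         '67': 'Centro-Oeste (MS)',
--         '68-69': 'Norte (AC/RO)',
--         '71-77': 'Nordeste (BA)',
--         '79': 'Nordeste (SE)',
--         '81-89': 'Nordeste (PE/AL/PB/RN/CE/PI)',
--         '91-99': 'Norte (PA/AM/RR/AP/MA)'
--     }
--
--     ddd_num = int(ddd)
--     for intervalo, regiao in regioes.items():
--         inicio, fim = map(int, intervalo.split('-')) if '-' in intervalo else (int(intervalo), int(intervalo))
--         if inicio <= ddd_num <= fim:
--             return regiao
--     return 'Região não identificada'
-- ===== SOURCE B (Python) =====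
-- _FAIXAS = [
--     ((11, 19), 'Sudeste (SP)'),
--     ((21, 24), 'Sudeste (RJ/ES)'),
--     ((27, 28), 'Sudeste (ES)'),
--     ((31, 38), 'Sudeste (MG)'),
--     ((41, 46), 'Sul (PR)'),
--     ((47, 49), 'Sul (SC)'),
--     ((51, 55), 'Sul (RS)'),
--     ((61, 61), 'Centro-Oeste (DF)'),
--     ((62, 64), 'Centro-Oeste (GO)'),
--     ((65, 66), 'Centro-Oeste (MT)'),
--     ((67, 67), 'Centro-Oeste (MS)'),
--     ((68, 69), 'Norte (AC/RO)'),
--     ((71, 77), 'Nordeste (BA)'),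
--     ((79, 79), 'Nordeste (SE)'),
--     ((81, 89), 'Nordeste (PE/AL/PB/RN/CE/PI)'),
--     ((91, 99), 'Norte (PA/AM/RR/AP/MA)'),
-- ]
--
-- # Flat lookup table built once: every individual DDD mapped to its region.
-- _TABELA = {d: r for (ini, fim), r in _FAIXAS for d in range(ini, fim + 1)}
--
--
-- def _identificar_regiao(ddd: str) -> str:
--     """Identifica a região do DDD"""
--     return _TABELA.get(int(ddd), 'Região não identificada')
-- ===== Notes on version B (the rewrite author's own statement) =====
-- stated objective: faster
-- what changed: B precomputes a flat dict from every individual DDD to its region (expanding the numeric ranges once at module load), so each query is a single int() conversion plus one dict lookup instead of parsing 16 range strings and scanning intervals with bound comparisons.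
import Mathlib
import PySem

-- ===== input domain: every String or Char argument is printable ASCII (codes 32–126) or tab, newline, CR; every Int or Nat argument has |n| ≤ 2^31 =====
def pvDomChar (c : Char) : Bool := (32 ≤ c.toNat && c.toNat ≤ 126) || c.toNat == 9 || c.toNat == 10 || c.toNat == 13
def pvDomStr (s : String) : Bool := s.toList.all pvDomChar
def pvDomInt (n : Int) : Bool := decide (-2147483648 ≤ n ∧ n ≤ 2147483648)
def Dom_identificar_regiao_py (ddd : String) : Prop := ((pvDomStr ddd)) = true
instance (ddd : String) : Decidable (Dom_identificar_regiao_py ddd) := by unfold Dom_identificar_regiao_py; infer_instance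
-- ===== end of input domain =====

-- B replaces A's per-call interval scan over 16 range strings by a flat DDD→region
-- table built once (each range expanded), so a query is one int parse + one lookup.


-- ===== PORT A =====
-- A's dict literal of range-string → region, iterated in insertion order.
def pvRegioes : List (String × String) :=
  [("11-19", "Sudeste (SP)"),
   ("21-24", "Sudeste (RJ/ES)"),
   ("27-28", "Sudeste (ES)"),
   ("31-38", "Sudeste (MG)"),
   ("41-46", "Sul (PR)"),
   ("47-49", "Sul (SC)"),
   ("51-55", "Sul (RS)"),
   ("61", "Centro-Oeste (DF)"),
   ("62-64", "Centro-Oeste (GO)"),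
   ("65-66", "Centro-Oeste (MT)"),
   ("67", "Centro-Oeste (MS)"),
   ("68-69", "Norte (AC/RO)"),
   ("71-77", "Nordeste (BA)"),
   ("79", "Nordeste (SE)"),
   ("81-89", "Nordeste (PE/AL/PB/RN/CE/PI)"),
   ("91-99", "Norte (PA/AM/RR/AP/MA)")]

-- "inicio, fim = map(int, intervalo.split('-')) if '-' in intervalo else (int(intervalo), int(intervalo))"
-- (the keys are literal numeric strings of the dict above, so int() never raises and the
-- split has exactly two pieces: the fallback arms are unreachable on A's data)
def pvParse (intervalo : String) : Int × Int :=
  if PySem.Str.isIn "-" intervalo then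
    -- .split('-') with the non-empty separator "-" never raises: split? is always some here
    match ((PySem.Str.split? intervalo "-").getD []).map (fun s => (PySem.Int.ofStr? s).getD 0) with
    | [a, b] => (a, b)
    | _ => (0, 0)
  else ((PySem.Int.ofStr? intervalo).getD 0, (PySem.Int.ofStr? intervalo).getD 0)

-- the "for intervalo, regiao in regioes.items():" loop
def pvScanA (ddd_num : Int) : List (String × String) → String
  | [] => "Região não identificada"
  | (intervalo, regiao) :: rest =>
    let p := pvParse intervalo
    if p.1 ≤ ddd_num ∧ ddd_num ≤ p.2 then regiao else pvScanA ddd_num rest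

def identificar_regiao_py (ddd : String) : String :=
  match PySem.Int.ofStr? ddd with
  | none => ""            -- int(ddd) raises ValueError here; excluded by Pre_
  | some n => pvScanA n pvRegioes

-- ===== PORT B =====
def pvFaixas : List ((Int × Int) × String) :=
  [((11, 19), "Sudeste (SP)"),
   ((21, 24), "Sudeste (RJ/ES)"),
   ((27, 28), "Sudeste (ES)"),
   ((31, 38), "Sudeste (MG)"),
   ((41, 46), "Sul (PR)"),
   ((47, 49), "Sul (SC)"),
   ((51, 55), "Sul (RS)"),
   ((61, 61), "Centro-Oeste (DF)"),
   ((62, 64), "Centro-Oeste (GO)"),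
   ((65, 66), "Centro-Oeste (MT)"),
   ((67, 67), "Centro-Oeste (MS)"),
   ((68, 69), "Norte (AC/RO)"),
   ((71, 77), "Nordeste (BA)"),
   ((79, 79), "Nordeste (SE)"),
   ((81, 89), "Nordeste (PE/AL/PB/RN/CE/PI)"),
   ((91, 99), "Norte (PA/AM/RR/AP/MA)")]

-- "_TABELA = {d: r for (ini, fim), r in _FAIXAS for d in range(ini, fim + 1)}"
def pvTabela : PySem.Dict Int String :=
  pvFaixas.foldl
    (fun d p => (PySem.List.pyRange p.1.1 (p.1.2 + 1) 1).foldl (fun d n => d.insert n p.2) d)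
    PySem.Dict.empty

def identificar_regiao_py_alt (ddd : String) : String :=
  match PySem.Int.ofStr? ddd with
  | none => ""            -- int(ddd) raises ValueError here too; excluded by Pre_
  | some n => pvTabela.getD n "Região não identificada"

-- ===== PRECONDITION & SPEC =====
-- Pre_ excludes exactly the strings on which int(ddd) raises ValueError (both A and B raise there).
def Pre_identificar_regiao_py (ddd : String) : Prop := (PySem.Int.ofStr? ddd).isSome = true
instance (ddd : String) : Decidable (Pre_identificar_regiao_py ddd) := by unfold Pre_identificar_regiao_py; infer_instance
def pvWitness_identificar_regiao_py : String := "11"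

def Spec_identificar_regiao_py (ddd : String) (out : String) : Prop := out = identificar_regiao_py_alt ddd
instance (ddd : String) (out : String) : Decidable (Spec_identificar_regiao_py ddd out) := by unfold Spec_identificar_regiao_py; infer_instance

-- ===== CLAIM (what is proved, stated in full; the proofs are below) =====
def Claim_equal_identificar_regiao_py : Prop := ∀ (ddd : String), Dom_identificar_regiao_py ddd → Pre_identificar_regiao_py ddd → Spec_identificar_regiao_py ddd (identificar_regiao_py ddd)

-- ===== LEMMAS AND PROOFS =====

-- A's scan returns the default when n clears every parsed interval of the list.
theorem pvScanA_of_all_out (n : Int) (l : List (String × String))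
    (h : ∀ p ∈ l, ¬ ((pvParse p.1).1 ≤ n ∧ n ≤ (pvParse p.1).2)) :
    pvScanA n l = "Região não identificada" := by
  induction l with
  | nil => rfl
  | cons hd tl ih =>
    obtain ⟨iv, rg⟩ := hd
    simp only [pvScanA]
    rw [if_neg (h (iv, rg) List.mem_cons_self)]
    exact ih fun p hp => h p (List.mem_cons_of_mem _ hp)

-- every parsed interval of A lies within [11, 99]
set_option maxRecDepth 8192 in
theorem pvRegioes_bounds : ∀ p ∈ pvRegioes, 11 ≤ (pvParse p.1).1 ∧ (pvParse p.1).2 ≤ 99 := by decide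

-- every key of B's table lies in [11, 99]
set_option maxRecDepth 8192 in
theorem pvTabela_keys_bounded : ∀ k ∈ pvTabela.keys, 11 ≤ k ∧ k ≤ 99 := by decide

theorem pvTabela_getD_out (n : Int) (h : n < 11 ∨ 99 < n) :
    pvTabela.getD n "Região não identificada" = "Região não identificada" := by
  apply PySem.Dict.getD_of_not_contains
  cases hc : pvTabela.contains n with
  | false => rfl
  | true =>
    exfalso
    have hk : n ∈ pvTabela.keys := (PySem.Dict.contains_iff_mem_keys _ _).mp hc
    have := pvTabela_keys_bounded n hk
    omega

-- the two per-number results coincide for every integer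
set_option maxRecDepth 8192 in
set_option maxHeartbeats 2000000 in
theorem pvCore_eq (n : Int) :
    pvScanA n pvRegioes = pvTabela.getD n "Região não identificada" := by
  by_cases hlo : 11 ≤ n
  · by_cases hhi : n ≤ 99
    · interval_cases n <;> decide
    · rw [pvTabela_getD_out n (by omega)]
      exact pvScanA_of_all_out n pvRegioes (fun p hp => by have := pvRegioes_bounds p hp; omega)
  · rw [pvTabela_getD_out n (by omega)]
    exact pvScanA_of_all_out n pvRegioes (fun p hp => by have := pvRegioes_bounds p hp; omega)

-- ===== VERDICT (by name: the statement is the Claim_ definition above) =====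
theorem identificar_regiao_py_spec : Claim_equal_identificar_regiao_py := by
  intro ddd _ hpre
  unfold Spec_identificar_regiao_py identificar_regiao_py identificar_regiao_py_alt
  cases h : PySem.Int.ofStr? ddd with
  | none => rfl
  | some n => exact pvCore_eq n
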